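/-
  OBJECTS (Asan/Objects.lean) AND BLOCKS (Vorbis/Fields/Core.lean): the same thing at two levels.

  `Asan.Obj` (base, size, kind) is the element of the LIVE LIST that the shadow invariant `ShadowOK` / `ShadowInv` is about: objects
  come and go with the shadow stores. `Vorbis.Block` (base, size) is what the decoder's invariants and the field vocabulary talk about,
  and `Vorbis.acc_of_obj : Covers Live mem → B.live Live → …` discharges a check site from a live SET. This file lets a function proof
  go from one to the other:

      o.block                       the block of an object
      liveOf_blocks                 the live set of the blocks of a list of objects is `Live objs`
      Obj.block_live                an object of the list is live in `Live objs`
      ShadowInv.covers              the cover `Vorbis.acc_of_obj` asks for: `Covers (Live (stackObjs frames ++ others)) mem`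
      ShadowInv.live_other / .live_frame
                                    `B.live` for an object of `others` / a stack object of an active protected frame

  Typical check site: `acc_of_obj h.covers (h.live_other ho) h1 h2 hn`, with `h : ShadowInv others frames top u.mem`.
-/
import Vorbis.Fields.Core
import Asan.Stack
namespace Vorbis
open X86 X86.User Asan

/-- The block of an object: its kind forgotten. -/
def _root_.Asan.Obj.block (o : Obj) : Block := ⟨o.base, o.size⟩

@[simp] theorem Obj.block_base (o : Obj) : o.block.base = o.base := id rfl
@[simp] theorem Obj.block_size (o : Obj) : o.block.size = o.size := id rfl

/-- A byte is in the block of an object iff it is one of the object's bytes. -/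
theorem Obj.block_mem (o : Obj) (x : Nat) : o.block.mem x ↔ o.Bytes x := Iff.rfl

/-- The live set of the blocks of a list of objects is the live set of the objects. -/
theorem liveOf_blocks (objs : List Obj) (x : Nat) : liveOf (objs.map Obj.block) x ↔ Live objs x := by
  unfold liveOf Live
  constructor
  · intro h
    obtain ⟨B, hB, hm⟩ := h
    obtain ⟨o, ho, e⟩ := List.mem_map.mp hB
    subst e
    exact ⟨o, ho, hm⟩
  · intro h
    obtain ⟨o, ho, hb⟩ := h
    exact ⟨o.block, List.mem_map.mpr ⟨o, ho, rfl⟩, hb⟩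

/-- **An object of the list is live** in the list's live set. -/
theorem Obj.block_live {objs : List Obj} {o : Obj} (ho : o ∈ objs) : o.block.live (Live objs) := by
  rw [Block.live_iff]
  intro x hx
  exact ⟨o, ho, hx⟩

/-- A sub-block of a live object is live (a struct inside an arena block, an element of an array). -/
theorem Obj.sub_live {objs : List Obj} {o : Obj} (ho : o ∈ objs) (off size : Nat) (hs : off + size ≤ o.size) :
    (o.block.sub off size).live (Live objs) :=
  (Obj.block_live ho).sub off size hs

end Vorbis

namespace Asan.ShadowInv
open X86 X86.User Vorbis
variable {others : List Obj} {frames : List (Nat × FrameLayout)} {top : Nat} {mem : Mem}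

/-- **The cover of the live set**, in the form `Vorbis.acc_of_obj` takes it. -/
theorem covers (h : ShadowInv others frames top mem) : Covers (Live (stackObjs frames ++ others)) mem :=
  h.shadow.covers

/-- One of the `others` (global, input, output, arena block) is live. -/
theorem live_other (_ : ShadowInv others frames top mem) {o : Obj} (ho : o ∈ others) :
    o.block.live (Live (stackObjs frames ++ others)) :=
  Obj.block_live (List.mem_append_right _ ho)

/-- A stack object of an active protected frame is live. -/
theorem live_frame (_ : ShadowInv others frames top mem) {base : Nat} {F : FrameLayout} (hF : (base, F) ∈ frames)
    {o : Obj} (ho : o ∈ F.objsAt base) : o.block.live (Live (stackObjs frames ++ others)) := by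
  apply Obj.block_live
  apply List.mem_append_left
  unfold stackObjs
  exact List.mem_flatMap.mpr ⟨(base, F), hF, ho⟩

end Asan.ShadowInv

namespace Vorbis
open X86 X86.User Asan

/-- Example: the 4-byte check of `f->channels`-like field at offset `off` of an arena block `o`, Q1's way. -/
example {others : List Obj} {frames : List (Nat × FrameLayout)} {top : Nat} {mem : Mem} (h : ShadowInv others frames top mem)
    {o : Obj} (ho : o ∈ others) (off : Nat) (hoff : off + 4 ≤ o.size) : AccessibleSmall mem (o.base + off) 4 :=
  acc_of_field h.covers (h.live_other ho) off 4 hoff (by omega)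

end Vorbis
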